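-- pv_equiv track=rewrite | github.com/rudraptpsingh/Penova | tools/storyboard/fountain.py | _is_caps
-- ===== SOURCE A (Python) =====
-- def _is_caps(s: str) -> bool:
--     """A line counts as 'all caps' if it has at least one letter and no
--     lowercase letters. Digits, parens, periods, slashes are tolerated.
--     """
--     saw_letter = False
--     for ch in s:
--         if ch.isalpha():
--             saw_letter = True
--             if ch.islower():
--                 return False
--     return saw_letter
-- ===== SOURCE B (Python) =====
-- def _is_caps(s: str) -> bool:
--     # Case-mapping comparison instead of a character scan:
--     # s == s.upper()  <=>  s contains no lowercase letter;
--     # s != s.lower()  <=>  s contains an uppercase letter, i.e. (given the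
--     # first conjunct) at least one letter.
--     return s == s.upper() and s != s.lower()
-- ===== Notes on version B (the rewrite author's own statement) =====
-- stated objective: alternative
-- what changed: Replaces A's per-character predicate scan (saw_letter flag, isalpha/islower tests, early return) with whole-string case-mapping comparisons: s == s.upper() (no lowercase) and s != s.lower() (an uppercase letter exists, hence a letter).
import Mathlib
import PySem

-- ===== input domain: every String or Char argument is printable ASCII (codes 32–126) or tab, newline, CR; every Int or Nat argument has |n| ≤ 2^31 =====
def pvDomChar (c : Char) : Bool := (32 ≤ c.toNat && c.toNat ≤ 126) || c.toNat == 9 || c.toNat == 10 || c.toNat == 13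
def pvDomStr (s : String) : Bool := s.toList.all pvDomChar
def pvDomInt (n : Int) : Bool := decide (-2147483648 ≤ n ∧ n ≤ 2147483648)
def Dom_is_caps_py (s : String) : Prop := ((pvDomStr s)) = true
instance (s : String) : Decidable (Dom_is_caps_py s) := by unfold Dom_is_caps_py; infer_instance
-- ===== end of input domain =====

-- B replaces A's per-character predicate scan with whole-string case-mapping
-- comparisons (s == s.upper() and s != s.lower()) — alternative, same cost.

-- ===== PORT A =====
-- loop with saw_letter flag and early 'return False' on a lowercase letter
def isCapsLoopA : List Char → Bool → Bool
  | [], saw => saw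
  | c :: cs, saw =>
    if PySem.Chars.isalpha c then
      if PySem.Chars.islower c then false
      else isCapsLoopA cs true
    else isCapsLoopA cs saw

def is_caps_py (s : String) : Bool := isCapsLoopA s.toList false

-- ===== PORT B =====
def is_caps_py_alt (s : String) : Bool :=
  (s == PySem.Str.upper s) && !(s == PySem.Str.lower s)

-- ===== PRECONDITION & SPEC =====
def Spec_is_caps_py (s : String) (out : Bool) : Prop := out = is_caps_py_alt s
instance (s : String) (out : Bool) : Decidable (Spec_is_caps_py s out) := by unfold Spec_is_caps_py; infer_instance

-- ===== CLAIM (what is proved, stated in full; the proofs are below) =====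
def Claim_equal_is_caps_py : Prop := ∀ (s : String), Dom_is_caps_py s → Spec_is_caps_py s (is_caps_py s)

-- ===== LEMMAS AND PROOFS =====

-- A's loop computes: some uppercase letter present and no lowercase letter present.
theorem isCapsLoopA_eq (cs : List Char) (saw : Bool) :
    isCapsLoopA cs saw
      = ((saw || cs.any PySem.Chars.isupper) && !(cs.any PySem.Chars.islower)) := by
  induction cs generalizing saw with
  | nil => simp [isCapsLoopA]
  | cons c cs ih =>
    by_cases hl : PySem.Chars.islower c = true
    · simp [isCapsLoopA, PySem.Chars.isalpha, hl]
    · simp only [Bool.not_eq_true] at hl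
      by_cases hu : PySem.Chars.isupper c = true
      · simp [isCapsLoopA, PySem.Chars.isalpha, hl, hu, ih]
      · simp only [Bool.not_eq_true] at hu
        simp [isCapsLoopA, PySem.Chars.isalpha, hl, hu, ih]

theorem upperChar_fix_iff (c : Char) :
    PySem.Chars.upperChar c = c ↔ PySem.Chars.islower c = false := by
  unfold PySem.Chars.upperChar
  constructor
  · intro h
    by_contra hne
    simp only [Bool.not_eq_false] at hne
    rw [if_pos hne] at h
    have hb : 97 ≤ c.toNat ∧ c.toNat ≤ 122 := by
      have h12 : ('a' : Char) ≤ c ∧ c ≤ 'z' := by simpa [PySem.Chars.islower] using hne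
      simpa [Char.le_def] using h12
    have hv : (c.toNat - 32).isValidChar := Or.inl (by omega)
    have := congrArg Char.toNat h
    rw [Char.toNat_ofNat, if_pos hv] at this
    omega
  · intro h; rw [if_neg (by simp [h])]

theorem lowerChar_fix_iff (c : Char) :
    PySem.Chars.lowerChar c = c ↔ PySem.Chars.isupper c = false := by
  unfold PySem.Chars.lowerChar
  constructor
  · intro h
    by_contra hne
    simp only [Bool.not_eq_false] at hne
    rw [if_pos hne] at h
    have hb : 65 ≤ c.toNat ∧ c.toNat ≤ 90 := by
      have h12 : ('A' : Char) ≤ c ∧ c ≤ 'Z' := by simpa [PySem.Chars.isupper] using hne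
      simpa [Char.le_def] using h12
    have hv : (c.toNat + 32).isValidChar := Or.inl (by omega)
    have := congrArg Char.toNat h
    rw [Char.toNat_ofNat, if_pos hv] at this
    omega
  · intro h; rw [if_neg (by simp [h])]

theorem map_fix_iff (l : List Char) (f : Char → Char) :
    l = l.map f ↔ ∀ c ∈ l, f c = c := by
  constructor
  · induction l with
    | nil => intro _ c hc; cases hc
    | cons a as ih =>
      intro h c hc
      simp only [List.map_cons, List.cons.injEq] at h
      rcases List.mem_cons.mp hc with rfl | hc
      · exact h.1.symm
      · exact ih h.2 c hc
  · intro h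
    exact ((List.map_congr_left h).trans (List.map_id _)).symm

theorem eq_upper_iff (l : List Char) :
    l = PySem.Chars.upper l ↔ l.any PySem.Chars.islower = false := by
  rw [PySem.Chars.upper, map_fix_iff, List.any_eq_false]
  exact ⟨fun h c hc => by simp [(upperChar_fix_iff c).mp (h c hc)],
         fun h c hc => (upperChar_fix_iff c).mpr (by simpa using h c hc)⟩

theorem eq_lower_iff (l : List Char) :
    l = PySem.Chars.lower l ↔ l.any PySem.Chars.isupper = false := by
  rw [PySem.Chars.lower, map_fix_iff, List.any_eq_false]
  exact ⟨fun h c hc => by simp [(lowerChar_fix_iff c).mp (h c hc)],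
         fun h c hc => (lowerChar_fix_iff c).mpr (by simpa using h c hc)⟩

theorem string_eq_iff_toList (s t : String) : s = t ↔ s.toList = t.toList :=
  ⟨fun h => by rw [h], String.toList_inj.mp⟩

-- ===== VERDICT (by name: the statement is the Claim_ definition above) =====
theorem is_caps_py_spec : Claim_equal_is_caps_py := by
  intro s _
  unfold Spec_is_caps_py is_caps_py is_caps_py_alt
  rw [isCapsLoopA_eq]
  have hu : (s == PySem.Str.upper s)
      = !(s.toList.any PySem.Chars.islower) := by
    rcases h : s.toList.any PySem.Chars.islower with _ | _
    · simp only [Bool.not_false]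
      exact beq_iff_eq.mpr ((string_eq_iff_toList _ _).mpr
        (by rw [PySem.Str.toList_upper]; exact (eq_upper_iff s.toList).mpr h))
    · simp only [Bool.not_true, beq_eq_false_iff_ne, ne_eq]
      intro hcontra
      have := (eq_upper_iff s.toList).mp
        (by rw [string_eq_iff_toList, PySem.Str.toList_upper] at hcontra; exact hcontra)
      simp [this] at h
  have hl : (s == PySem.Str.lower s)
      = !(s.toList.any PySem.Chars.isupper) := by
    rcases h : s.toList.any PySem.Chars.isupper with _ | _
    · simp only [Bool.not_false]
      exact beq_iff_eq.mpr ((string_eq_iff_toList _ _).mpr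
        (by rw [PySem.Str.toList_lower]; exact (eq_lower_iff s.toList).mpr h))
    · simp only [Bool.not_true, beq_eq_false_iff_ne, ne_eq]
      intro hcontra
      have := (eq_lower_iff s.toList).mp
        (by rw [string_eq_iff_toList, PySem.Str.toList_lower] at hcontra; exact hcontra)
      simp [this] at h
  rw [hu, hl]
  cases s.toList.any PySem.Chars.isupper <;> cases s.toList.any PySem.Chars.islower <;> rfl
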